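-- pv_equiv track=rewrite | github.com/asmazehi/payroll-insaf-pfe-2026 | etl/recover_ind2015.py | normalize_decimal_commas_outside_strings
-- ===== SOURCE A (Python) =====
-- from typing import Any, Dict, Iterator, List, Optional, Set, Tuple
--
-- def normalize_decimal_commas_outside_strings(text: str) -> str:
--     out: List[str] = []
--     in_string = False
--     escaped = False
--     n = len(text)
--
--     for i, ch in enumerate(text):
--         if in_string:
--             out.append(ch)
--             if escaped:
--                 escaped = False
--             elif ch == "\\":
--                 escaped = True
--             elif ch == '"':
--                 in_string = False
--             continue
--
--         if ch == '"':
--             in_string = True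
--             out.append(ch)
--             continue
--
--         if ch == ",":
--             prev_is_digit = i > 0 and text[i - 1].isdigit()
--             next_is_digit = i + 1 < n and text[i + 1].isdigit()
--             if prev_is_digit and next_is_digit:
--                 out.append(".")
--                 continue
--
--         out.append(ch)
--
--     return "".join(out)
-- ===== SOURCE B (Python) =====
-- def normalize_decimal_commas_outside_strings(text: str) -> str:
--     # Tokenize-then-substitute: split the text at quoted string literals and
--     # rewrite digit,digit commas only inside the unquoted gaps.
--     def fix(seg: str) -> str:
--         prevs = [''] + list(seg)
--         nexts = list(seg[1:]) + ['']
--         return ''.join(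
--             '.' if c == ',' and p.isdigit() and nx.isdigit() else c
--             for p, c, nx in zip(prevs, seg, nexts))
--
--     parts = []
--     rest = text
--     while True:
--         pre, q, rest = rest.partition('"')
--         parts.append(fix(pre))
--         if not q:
--             break
--         parts.append('"')
--         k = 0
--         n = len(rest)
--         while k < n:
--             c = rest[k]
--             if c == '\\':
--                 k += 2
--             elif c == '"':
--                 k += 1
--                 break
--             else:
--                 k += 1
--         k = min(k, n)
--         parts.append(rest[:k])
--         rest = rest[k:]
--     return ''.join(parts)
-- ===== Notes on version B (the rewrite author's own statement) =====
-- stated objective: alternative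
-- what changed: Replaced the per-character in-string/escaped state machine by a tokenize-then-substitute pass: the text is split at quoted-string literals (partition on '"' plus an escape-aware skip), each unquoted gap is rewritten by a positional zip of (prev, char, next) triples, and the pieces are concatenated.
import Mathlib
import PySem

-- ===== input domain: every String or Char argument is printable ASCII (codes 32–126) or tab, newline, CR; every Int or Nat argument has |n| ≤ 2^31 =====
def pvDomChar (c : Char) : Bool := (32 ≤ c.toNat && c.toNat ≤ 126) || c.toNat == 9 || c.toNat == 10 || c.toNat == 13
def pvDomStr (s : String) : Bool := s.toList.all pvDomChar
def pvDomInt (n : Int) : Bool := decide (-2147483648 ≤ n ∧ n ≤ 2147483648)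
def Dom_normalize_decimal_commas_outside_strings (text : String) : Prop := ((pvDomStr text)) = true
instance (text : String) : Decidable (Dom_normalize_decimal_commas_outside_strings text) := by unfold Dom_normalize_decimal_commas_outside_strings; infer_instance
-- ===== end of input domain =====

-- B replaces A's per-character in-string/escaped state machine by a tokenize-then-substitute
-- pass (split at string literals, rewrite digit,digit commas in the gaps); alternative, same cost.


-- ===== PORT A =====
-- one step of A's for-loop (st = (out, in_string, escaped), ic = (i, ch));
-- text[i-1]/text[i+1] are accessed only under the 0<i / i+1<n guards, so pyGetD is exact.
def pvStepA (cs : List Char) (st : List Char × Bool × Bool) (ic : Int × Char) :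
    List Char × Bool × Bool :=
  let n : Int := cs.length
  let out := st.1; let in_string := st.2.1; let escaped := st.2.2
  let i := ic.1; let ch := ic.2
  if in_string then
    let out := out ++ [ch]
    if escaped then (out, in_string, false)
    else if ch = '\\' then (out, in_string, true)
    else if ch = '"' then (out, false, escaped)
    else (out, in_string, escaped)
  else if ch = '"' then (out ++ [ch], true, escaped)
  else if ch = ',' then
    let prev_is_digit := decide (0 < i) && PySem.Chars.isdigit (PySem.List.pyGetD cs (i - 1) ' ')
    let next_is_digit := decide (i + 1 < n) && PySem.Chars.isdigit (PySem.List.pyGetD cs (i + 1) ' ')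
    if prev_is_digit && next_is_digit then (out ++ ['.'], in_string, escaped)
    else (out ++ [ch], in_string, escaped)
  else (out ++ [ch], in_string, escaped)

def normalize_decimal_commas_outside_strings (text : String) : String :=
  let cs := text.toList
  let res := (PySem.List.enumerate cs).foldl (pvStepA cs) ([], false, false)
  String.ofList res.1

-- ===== PORT B =====
-- fix(seg): zip of ('' :: seg, seg, seg[1:] + ['']) triples; the '' sentinel is ported as the
-- non-digit char ' ' (Python ''.isdigit() is False, matching).
def pvFix (seg : List Char) : List Char :=
  let prevs := ' ' :: seg
  let nexts := seg.drop 1 ++ [' ']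
  List.zipWith3 (fun p c nx =>
    if c = ',' ∧ PySem.Chars.isdigit p ∧ PySem.Chars.isdigit nx then '.' else c) prevs seg nexts

-- the inner while loop over rest (index k advancing by 1 or 2) as recursion on the list:
-- returns (rest[:k], rest[k:]) — the consumed string body (through the closing quote) and the rest.
def pvSkip : List Char → List Char × List Char
  | [] => ([], [])
  | c :: rest =>
    if c = '\\' then
      match rest with
      | [] => ([c], [])
      | d :: rest' => let p := pvSkip rest'; (c :: d :: p.1, p.2)
    else if c = '"' then ([c], rest)
    else let p := pvSkip rest; (c :: p.1, p.2)
termination_by cs => cs.length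
decreasing_by all_goals (simp_all; try omega)

theorem pvSkip_len (t : List Char) : (pvSkip t).2.length ≤ t.length := by
  generalize hn : t.length = n
  induction n using Nat.strong_induction_on generalizing t with
  | _ n ih =>
  match t, hn with
  | [], _ => simp [pvSkip]
  | c :: rest, hn =>
    by_cases hb : c = '\\'
    · subst hb
      cases rest with
      | nil =>
        have h : pvSkip ['\\'] = (['\\'], []) := by rw [pvSkip.eq_def]; rfl
        simp [h]
      | cons d r' =>
        have h : pvSkip ('\\' :: d :: r') = ('\\' :: d :: (pvSkip r').1, (pvSkip r').2) := by
          rw [pvSkip.eq_def]; rfl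
        have h2 := ih r'.length (by simp at hn; omega) r' rfl
        rw [h]; simp at hn ⊢; omega
    · by_cases hq : c = '"'
      · subst hq
        have h : pvSkip ('"' :: rest) = (['"'], rest) := by rw [pvSkip.eq_def]; rfl
        simp [h]
        simp at hn
        omega
      · have h : pvSkip (c :: rest) = (c :: (pvSkip rest).1, (pvSkip rest).2) := by
          rw [pvSkip.eq_def]; simp [hb, hq]
        have h2 := ih rest.length (by simp at hn; omega) rest rfl
        rw [h]; simp at hn ⊢; omega

-- the outer while True loop: partition at '"' (= take/dropWhile), emit fix(gap), the quote,
-- the skipped string body, then continue on the remainder.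
def pvGoB (cs : List Char) : List Char :=
  match hrest : cs.dropWhile (· ≠ '"') with
  | [] => pvFix (cs.takeWhile (· ≠ '"'))
  | _q :: tail => pvFix (cs.takeWhile (· ≠ '"')) ++ '"' :: ((pvSkip tail).1 ++ pvGoB (pvSkip tail).2)
termination_by cs.length
decreasing_by
  have h1 : (pvSkip tail).2.length ≤ tail.length := pvSkip_len tail
  have h2 : (cs.dropWhile (· ≠ '"')).length ≤ cs.length := List.length_dropWhile_le _ _
  rw [hrest] at h2
  simp at h2 ⊢
  omega

def normalize_decimal_commas_outside_strings_alt (text : String) : String :=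
  String.ofList (pvGoB text.toList)

-- ===== PRECONDITION & SPEC =====
def Spec_normalize_decimal_commas_outside_strings (text : String) (out : String) : Prop := out = normalize_decimal_commas_outside_strings_alt text
instance (text : String) (out : String) : Decidable (Spec_normalize_decimal_commas_outside_strings text out) := by unfold Spec_normalize_decimal_commas_outside_strings; infer_instance

-- ===== CLAIM (what is proved, stated in full; the proofs are below) =====
def Claim_equal_normalize_decimal_commas_outside_strings : Prop := ∀ (text : String), Dom_normalize_decimal_commas_outside_strings text → Spec_normalize_decimal_commas_outside_strings text (normalize_decimal_commas_outside_strings text)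

-- ===== LEMMAS AND PROOFS =====

-- Reference model: A's state machine written as three mutually recursive local passes.
def pvHeadDigit : List Char → Bool
  | [] => false
  | d :: _ => PySem.Chars.isdigit d

mutual
def pvRunOut (p : Char) : List Char → List Char
  | [] => []
  | c :: t =>
    if c = '"' then c :: pvRunIn t
    else (if c = ',' ∧ PySem.Chars.isdigit p ∧ pvHeadDigit t then '.' else c) :: pvRunOut c t

def pvRunIn : List Char → List Char
  | [] => []
  | c :: t =>
    if c = '\\' then c :: pvRunEsc t
    else if c = '"' then c :: pvRunOut '"' t
    else c :: pvRunIn t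

def pvRunEsc : List Char → List Char
  | [] => []
  | c :: t => c :: pvRunIn t
end

-- fix with an explicit initial previous character
def pvFixFrom (p : Char) : List Char → List Char
  | [] => []
  | c :: t => (if c = ',' ∧ PySem.Chars.isdigit p ∧ pvHeadDigit t then '.' else c) :: pvFixFrom c t

theorem pvFix_zip (q : Char) (seg : List Char) :
    List.zipWith3 (fun p c nx =>
      if c = ',' ∧ PySem.Chars.isdigit p ∧ PySem.Chars.isdigit nx then '.' else c)
      (q :: seg) seg (seg.drop 1 ++ [' ']) = pvFixFrom q seg := by
  induction seg generalizing q with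
  | nil => simp [List.zipWith3, pvFixFrom]
  | cons c t ih =>
    cases t with
    | nil => simp [List.zipWith3, pvFixFrom, pvHeadDigit, PySem.Chars.isdigit]
    | cons d t' =>
      simpa [List.zipWith3, pvFixFrom, pvHeadDigit] using ih c

theorem pvFixFrom_congr (p q : Char) (seg : List Char)
    (h : PySem.Chars.isdigit p = PySem.Chars.isdigit q) :
    pvFixFrom p seg = pvFixFrom q seg := by
  cases seg with
  | nil => rfl
  | cons c t => simp [pvFixFrom, h]

theorem pvFix_eq_fixFrom (p : Char) (seg : List Char)
    (hp : PySem.Chars.isdigit p = false) :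
    pvFix seg = pvFixFrom p seg := by
  have h := pvFix_zip ' ' seg
  unfold pvFix
  rw [h]
  exact pvFixFrom_congr ' ' p seg (by simpa [PySem.Chars.isdigit] using hp.symm)

-- the gap lemma: on a quote-free segment, pvRunOut is pvFixFrom followed by the continuation
theorem pvRunOut_gap (seg rest : List Char) (p : Char) (R : List Char)
    (hq : '"' ∉ seg) (hr : pvHeadDigit rest = false)
    (hR : ∀ q : Char, pvRunOut q rest = R) :
    pvRunOut p (seg ++ rest) = pvFixFrom p seg ++ R := by
  induction seg generalizing p with
  | nil => simpa [pvFixFrom] using hR p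
  | cons c t ih =>
    have hc : c ≠ '"' := by intro h; exact hq (h ▸ List.mem_cons_self ..)
    have hq' : '"' ∉ t := fun h => hq (List.mem_cons_of_mem _ h)
    have hhd : pvHeadDigit (t ++ rest) = pvHeadDigit t := by
      cases t with
      | nil => simpa [pvHeadDigit] using hr
      | cons d t' => rfl
    rw [List.cons_append]
    show (if c = '"' then c :: pvRunIn (t ++ rest)
      else (if c = ',' ∧ PySem.Chars.isdigit p ∧ pvHeadDigit (t ++ rest) then '.' else c)
        :: pvRunOut c (t ++ rest)) = _
    rw [if_neg hc, hhd, ih c hq']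
    rfl

-- the string-literal lemma: pvRunIn = the skipped body, then back outside with prev = '"'
theorem pvRunIn_skip (t : List Char) :
    pvRunIn t = (pvSkip t).1 ++ pvRunOut '"' (pvSkip t).2 := by
  generalize hn : t.length = n
  induction n using Nat.strong_induction_on generalizing t with
  | _ n ih =>
  match t, hn with
  | [], _ => simp [pvSkip, pvRunIn, pvRunOut]
  | c :: rest, hn =>
    by_cases hb : c = '\\'
    · subst hb
      cases rest with
      | nil =>
        have h : pvSkip ['\\'] = (['\\'], []) := by rw [pvSkip.eq_def]; rfl
        simp [h, pvRunIn, pvRunEsc, pvRunOut]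
      | cons d r' =>
        have h : pvSkip ('\\' :: d :: r') = ('\\' :: d :: (pvSkip r').1, (pvSkip r').2) := by
          rw [pvSkip.eq_def]; rfl
        have hih := ih r'.length (by simp at hn; omega) r' rfl
        rw [h]
        simp [pvRunIn, pvRunEsc, hih]
    · by_cases hq : c = '"'
      · subst hq
        have h : pvSkip ('"' :: rest) = (['"'], rest) := by rw [pvSkip.eq_def]; rfl
        simp [h, pvRunIn]
      · have h : pvSkip (c :: rest) = (c :: (pvSkip rest).1, (pvSkip rest).2) := by
          rw [pvSkip.eq_def]; simp [hb, hq]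
        have hih := ih rest.length (by simp at hn; omega) rest rfl
        rw [h]
        simp [pvRunIn, hb, hq, hih]

-- unfolding lemmas for pvGoB (its match is dependent, so spell the two cases out)
theorem pvDropWhile_head_false {α : Type} (p : α → Bool) (l : List α) (x : α) (t : List α)
    (h : l.dropWhile p = x :: t) : p x = false := by
  induction l with
  | nil => simp [List.dropWhile] at h
  | cons a l ih =>
    by_cases hp : p a
    · rw [List.dropWhile_cons_of_pos hp] at h; exact ih h
    · rw [List.dropWhile_cons_of_neg hp] at h
      cases h
      simpa using hp

theorem pvGoB_nil (cs : List Char) (h : cs.dropWhile (· ≠ '"') = []) :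
    pvGoB cs = pvFix (cs.takeWhile (· ≠ '"')) := by
  rw [pvGoB.eq_def]
  split
  · simp
  next q t heq => rw [h] at heq; cases heq

theorem pvGoB_cons (cs : List Char) (q : Char) (tail : List Char)
    (h : cs.dropWhile (· ≠ '"') = q :: tail) :
    pvGoB cs = pvFix (cs.takeWhile (· ≠ '"')) ++ '"' :: ((pvSkip tail).1 ++ pvGoB (pvSkip tail).2) := by
  rw [pvGoB.eq_def]
  split
  next heq => rw [h] at heq; cases heq
  next q' t' heq =>
    rw [h] at heq
    cases heq
    simp

-- main B-side lemma: the model equals pvGoB for any non-digit previous character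
theorem pvRunOut_eq_goB (cs : List Char) (p : Char)
    (hp : PySem.Chars.isdigit p = false) :
    pvRunOut p cs = pvGoB cs := by
  generalize hn : cs.length = n
  induction n using Nat.strong_induction_on generalizing cs p with
  | _ n ih =>
  have hsplit : cs.takeWhile (· ≠ '"') ++ cs.dropWhile (· ≠ '"') = cs :=
    List.takeWhile_append_dropWhile
  have hq : '"' ∉ cs.takeWhile (· ≠ '"') := by
    intro hmem
    have h2 := List.mem_takeWhile_imp hmem
    simp at h2
  cases hrest : cs.dropWhile (· ≠ '"') with
  | nil =>
    rw [pvGoB_nil cs hrest]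
    rw [hrest, List.append_nil] at hsplit
    have hgap := pvRunOut_gap (cs.takeWhile (· ≠ '"')) [] p [] hq (by simp [pvHeadDigit])
      (fun q => by simp [pvRunOut])
    simp only [List.append_nil] at hgap
    rw [← pvFix_eq_fixFrom p _ hp] at hgap
    calc pvRunOut p cs = pvRunOut p (cs.takeWhile (· ≠ '"')) := by rw [hsplit]
      _ = pvFix (cs.takeWhile (· ≠ '"')) := hgap
  | cons q0 tail =>
    have hq0 : q0 = '"' := by
      have h2 := pvDropWhile_head_false _ cs q0 tail hrest
      simpa using h2
    subst hq0
    rw [pvGoB_cons cs '"' tail hrest]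
    rw [hrest] at hsplit
    have hgap := pvRunOut_gap (cs.takeWhile (· ≠ '"')) ('"' :: tail) p
      ('"' :: pvRunIn tail) hq (by simp [pvHeadDigit, PySem.Chars.isdigit])
      (fun q => by
        show (if ('"' : Char) = '"' then '"' :: pvRunIn tail
          else (if ('"' : Char) = ',' ∧ PySem.Chars.isdigit q ∧ pvHeadDigit tail then '.' else '"')
            :: pvRunOut '"' tail) = '"' :: pvRunIn tail
        rw [if_pos rfl])
    have hlen : (pvSkip tail).2.length < n := by
      have h1 := pvSkip_len tail
      have h2 : cs.length = (cs.takeWhile (· ≠ '"')).length + 1 + tail.length := by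
        conv_lhs => rw [← hsplit]
        simp only [List.length_append, List.length_cons]
        omega
      omega
    have hIH := ih _ hlen ((pvSkip tail).2) '"' (by decide) rfl
    calc pvRunOut p cs = pvRunOut p (cs.takeWhile (· ≠ '"') ++ '"' :: tail) := by rw [hsplit]
      _ = pvFixFrom p (cs.takeWhile (· ≠ '"')) ++ '"' :: pvRunIn tail := hgap
      _ = pvFix (cs.takeWhile (· ≠ '"')) ++ '"' ::
            ((pvSkip tail).1 ++ pvGoB (pvSkip tail).2) := by
          rw [← pvFix_eq_fixFrom p _ hp, pvRunIn_skip, hIH]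

-- ===== A-side: the enumerate-fold equals the model =====
def pvPrev (done : List Char) : Char := done.getLast?.getD ' '

theorem pvPrev_append (done : List Char) (c : Char) : pvPrev (done ++ [c]) = c := by
  simp [pvPrev]

theorem pvFoldA (cs : List Char) :
    ∀ (todo done out : List Char) (inS esc : Bool),
      cs = done ++ todo → (esc = true → inS = true) →
      ((PySem.List.enumerate todo (done.length : Int)).foldl (pvStepA cs)
        (out, inS, esc)).1
        = out ++ (if inS then (if esc then pvRunEsc todo else pvRunIn todo)
                  else pvRunOut (pvPrev done) todo) := by
  intro todo
  induction todo with
  | nil =>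
    intro done out inS esc hcs hse
    cases inS <;> cases esc <;>
      simp [PySem.List.enumerate_nil, pvRunOut, pvRunIn, pvRunEsc]
  | cons ch t ih =>
    intro done out inS esc hcs hse
    rw [PySem.List.enumerate_cons, List.foldl_cons]
    have hcs' : cs = (done ++ [ch]) ++ t := by simp [hcs]
    have hlen : ((done ++ [ch]).length : Int) = (done.length : Int) + 1 := by
      simp
    -- facts about prev/next digit tests
    have hprev : (decide (0 < (done.length : Int)) &&
        PySem.Chars.isdigit (PySem.List.pyGetD cs ((done.length : Int) - 1) ' '))
        = PySem.Chars.isdigit (pvPrev done) := by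
      rcases List.eq_nil_or_concat done with rfl | ⟨ds, d, rfl⟩
      · simp [pvPrev, PySem.Chars.isdigit]
      · simp only [List.concat_eq_append] at hcs hcs' hlen ⊢
        have hcast : (((ds ++ [d]).length : Nat) : Int) - 1 = ((ds.length : Nat) : Int) := by
          simp
        rw [hcast, PySem.List.pyGetD_natCast]
        have hgl : cs.getD ds.length ' ' = d := by
          rw [hcs]
          rw [show ds ++ [d] ++ ch :: t = ds ++ (d :: (ch :: t)) by simp]
          rw [List.getD_eq_getElem?_getD, List.getElem?_append_right (le_refl _)]
          simp
        rw [hgl, pvPrev_append]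
        have hpos : decide ((0 : Int) < (((ds ++ [d]).length : Nat) : Int)) = true := by
          simp only [decide_eq_true_eq, List.length_append, List.length_cons]
          push_cast
          omega
        rw [hpos, Bool.true_and]
    have hnext : (decide ((done.length : Int) + 1 < (cs.length : Int)) &&
        PySem.Chars.isdigit (PySem.List.pyGetD cs ((done.length : Int) + 1) ' '))
        = pvHeadDigit t := by
      cases t with
      | nil =>
        have hl : cs.length = done.length + 1 := by rw [hcs]; simp
        simp [pvHeadDigit, hl]
      | cons d t' =>
        have hcast : ((done.length : Nat) : Int) + 1 = ((done.length + 1 : Nat) : Int) := by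
          push_cast; ring
        rw [hcast, PySem.List.pyGetD_natCast]
        have hgl : cs.getD (done.length + 1) ' ' = d := by
          rw [hcs, show done ++ ch :: d :: t' = (done ++ [ch]) ++ (d :: t') by simp]
          rw [List.getD_eq_getElem?_getD, List.getElem?_append_right (by simp)]
          simp
        rw [hgl]
        have hpos : decide ((((done.length + 1 : Nat)) : Int) < (cs.length : Int)) = true := by
          simp only [decide_eq_true_eq]
          rw [hcs]
          simp only [List.length_append, List.length_cons]
          push_cast
          omega
        rw [hpos, Bool.true_and]
        rfl
    -- case split on the state
    by_cases hS : inS = true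
    · subst hS
      by_cases hE : esc = true
      · subst hE
        have := ih (done ++ [ch]) (out ++ [ch]) true false hcs' (by simp)
        rw [hlen] at this
        simp only [pvStepA, if_pos rfl]
        simpa [pvRunEsc, this]
      · have hE' : esc = false := by simpa using hE
        subst hE'
        by_cases hb : ch = '\\'
        · subst hb
          have := ih (done ++ ['\\']) (out ++ ['\\']) true true hcs' (by simp)
          rw [hlen] at this
          simp only [pvStepA]
          simpa [pvRunIn, this]
        · by_cases hqq : ch = '"'
          · subst hqq
            have := ih (done ++ ['"']) (out ++ ['"']) false false hcs' (by simp)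
            rw [hlen] at this
            simp only [pvStepA]
            simp [hb, pvRunIn, this, pvPrev_append]
          · have := ih (done ++ [ch]) (out ++ [ch]) true false hcs' (by simp)
            rw [hlen] at this
            simp only [pvStepA]
            simp [hb, hqq, pvRunIn, this]
    · have hS' : inS = false := by simpa using hS
      subst hS'
      have hE' : esc = false := by
        by_contra h
        simp at h
        exact absurd (hse h) (by simp)
      subst hE'
      by_cases hqq : ch = '"'
      · subst hqq
        have := ih (done ++ ['"']) (out ++ ['"']) true false hcs' (by simp)
        rw [hlen] at this
        simp only [pvStepA]
        simp [pvRunOut, this]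
      · by_cases hcm : ch = ','
        · subst hcm
          simp only [pvStepA]
          rw [if_neg (by simp), if_neg (by simp [hqq]), if_pos (by trivial)]
          simp only [hprev, hnext]
          by_cases hd : PySem.Chars.isdigit (pvPrev done) = true ∧ pvHeadDigit t = true
          · rw [if_pos (by simp [hd.1, hd.2])]
            have hrec := ih (done ++ [',']) (out ++ ['.']) false false hcs' (by simp)
            rw [hlen] at hrec
            rw [hrec]
            simp [pvRunOut, hd.1, hd.2, pvPrev_append]
          · rw [if_neg (by intro hcon; simp at hcon; exact hd ⟨hcon.1, hcon.2⟩)]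
            have hrec := ih (done ++ [',']) (out ++ [',']) false false hcs' (by simp)
            rw [hlen] at hrec
            rw [hrec]
            simp only [pvRunOut, if_neg (show ¬ (',' : Char) = '"' by decide)]
            rw [if_neg (show ¬ (True ∧ PySem.Chars.isdigit (pvPrev done) = true ∧ pvHeadDigit t = true) from
              fun hcon => hd ⟨hcon.2.1, hcon.2.2⟩)]
            simp [pvPrev_append]
        · have := ih (done ++ [ch]) (out ++ [ch]) false false hcs' (by simp)
          rw [hlen] at this
          simp only [pvStepA]
          simp [hqq, hcm, pvRunOut, this, pvPrev_append]

-- ===== VERDICT (by name: the statement is the Claim_ definition above) =====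
theorem normalize_decimal_commas_outside_strings_spec : Claim_equal_normalize_decimal_commas_outside_strings := by
  intro text _
  unfold Spec_normalize_decimal_commas_outside_strings
  have h := pvFoldA text.toList text.toList [] [] false false (by simp) (by simp)
  simp only [List.length_nil, Nat.cast_zero] at h
  rw [if_neg (show ¬(false = true) by simp), List.nil_append] at h
  show String.ofList ((List.foldl (pvStepA text.toList) ([], false, false)
      (PySem.List.enumerate text.toList 0)).1) = String.ofList (pvGoB text.toList)
  rw [h, pvRunOut_eq_goB text.toList (pvPrev []) (by decide)]
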